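-- pv_equiv track=rewrite | github.com/TheDarkLightX/Intelligent-Daemon-Interface | idi/devkit/tau_factory/tests/test_formal_verification.py | generate_passthrough_spec
-- ===== SOURCE A (Python) =====
-- def generate_passthrough_spec(n_steps: int) -> str:
--     """Generate passthrough spec."""
--     lines = [
--         'i0:sbf = in file("inputs/signal.in")',
--         'o0:sbf = out file("outputs/echo.out")',
--         '# Passthrough: output equals input',
--         'r o0[t] = i0[t]',
--     ]
--     for _ in range(n_steps):
--         lines.append('')
--     lines.append('q')
--     return '\n'.join(lines)
-- ===== SOURCE B (Python) =====
-- def generate_passthrough_spec(n_steps: int) -> str: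
--     """Generate passthrough spec."""
--     header = '\n'.join([
--         'i0:sbf = in file("inputs/signal.in")',
--         'o0:sbf = out file("outputs/echo.out")',
--         '# Passthrough: output equals input',
--         'r o0[t] = i0[t]',
--     ])
--     return header + '\n' * (max(n_steps, 0) + 1) + 'q'
-- ===== Notes on version B (the rewrite author's own statement) =====
-- stated objective: faster
-- what changed: Replaces the append-loop over range(n_steps) plus a final join with a closed-form result: the constant header joined once, then '\n' * (max(n_steps,0)+1) and 'q' concatenated directly.
import Mathlib
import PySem

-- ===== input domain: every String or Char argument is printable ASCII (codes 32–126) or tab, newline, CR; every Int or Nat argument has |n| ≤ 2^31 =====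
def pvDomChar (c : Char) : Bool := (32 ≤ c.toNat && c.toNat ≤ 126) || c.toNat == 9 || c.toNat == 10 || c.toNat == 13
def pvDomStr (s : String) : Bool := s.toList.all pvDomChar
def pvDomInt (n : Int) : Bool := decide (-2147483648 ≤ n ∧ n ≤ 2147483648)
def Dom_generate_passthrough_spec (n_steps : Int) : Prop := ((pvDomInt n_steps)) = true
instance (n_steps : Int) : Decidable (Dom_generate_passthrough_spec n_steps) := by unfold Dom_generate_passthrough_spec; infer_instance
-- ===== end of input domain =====

-- B replaces A's append-loop + join with a closed-form concatenation (header + '\n'*(max(n,0)+1) + 'q'); objective: simpler.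


-- ===== PORT A =====
def generate_passthrough_spec (n_steps : Int) : String :=
  let lines : List String :=
    [ "i0:sbf = in file(\"inputs/signal.in\")",
      "o0:sbf = out file(\"outputs/echo.out\")",
      "# Passthrough: output equals input",
      "r o0[t] = i0[t]" ]
  let lines := (PySem.List.pyRange 0 n_steps 1).foldl (fun acc _ => acc ++ [""]) lines
  let lines := lines ++ ["q"]
  PySem.Str.join "\n" lines

-- ===== PORT B =====
def generate_passthrough_spec_alt (n_steps : Int) : String :=
  let header := PySem.Str.join "\n"
    [ "i0:sbf = in file(\"inputs/signal.in\")",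
      "o0:sbf = out file(\"outputs/echo.out\")",
      "# Passthrough: output equals input",
      "r o0[t] = i0[t]" ]
  header ++ String.ofList (List.replicate (max n_steps 0 + 1).toNat '\n') ++ "q"

-- ===== PRECONDITION & SPEC =====
def Spec_generate_passthrough_spec (n_steps : Int) (out : String) : Prop := out = generate_passthrough_spec_alt n_steps
instance (n_steps : Int) (out : String) : Decidable (Spec_generate_passthrough_spec n_steps out) := by unfold Spec_generate_passthrough_spec; infer_instance

-- ===== CLAIM (what is proved, stated in full; the proofs are below) =====
def Claim_equal_generate_passthrough_spec : Prop := ∀ (n_steps : Int), Dom_generate_passthrough_spec n_steps → Spec_generate_passthrough_spec n_steps (generate_passthrough_spec n_steps)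

-- ===== LEMMAS AND PROOFS =====

-- the loop appends one "" per range element
theorem foldl_append_blank (l : List Int) (init : List String) :
    l.foldl (fun acc _ => acc ++ [""]) init = init ++ List.replicate l.length "" := by
  induction l generalizing init with
  | nil => simp
  | cons x xs ih => simp [List.foldl_cons, ih, List.replicate_succ, List.append_assoc]

-- the join of a line followed by the blank/q tail starts with that line and a newline
theorem join_head_step (x : List Char) (k : Nat) :
    PySem.Chars.join ['\n'] (x :: (List.replicate k [] ++ [['q']])) =
      x ++ '\n' :: PySem.Chars.join ['\n'] (List.replicate k [] ++ [['q']]) := by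
  cases k with
  | zero => simp [PySem.Chars.join_cons_cons]
  | succ m => simp [List.replicate_succ, PySem.Chars.join_cons_cons]

-- one blank line contributes exactly one newline to the join
theorem join_blank_step (k : Nat) :
    PySem.Chars.join ['\n'] ([] :: (List.replicate k [] ++ [['q']])) =
      '\n' :: PySem.Chars.join ['\n'] (List.replicate k [] ++ [['q']]) := by
  cases k with
  | zero => simp [PySem.Chars.join_cons_cons]
  | succ m => simp [List.replicate_succ, PySem.Chars.join_cons_cons]

-- joining k blank lines followed by "q" gives k newlines then 'q'
theorem join_blanks (k : Nat) :
    PySem.Chars.join ['\n'] (List.replicate k [] ++ [['q']]) = List.replicate k '\n' ++ ['q'] := by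
  induction k with
  | zero => simp [PySem.Chars.join_singleton]
  | succ m ih =>
    rw [List.replicate_succ, List.cons_append, join_blank_step, ih, List.replicate_succ,
        List.cons_append]

theorem generate_passthrough_spec_eq (n_steps : Int) :
    generate_passthrough_spec n_steps = generate_passthrough_spec_alt n_steps := by
  unfold generate_passthrough_spec generate_passthrough_spec_alt
  apply String.toList_injective
  have hmax : (max n_steps 0 + 1).toNat = n_steps.toNat + 1 := by omega
  simp [foldl_append_blank, hmax, PySem.Str.toList_join, PySem.Chars.join_cons_cons,
        join_head_step, join_blanks, List.replicate_succ]

-- ===== VERDICT (by name: the statement is the Claim_ definition above) =====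
theorem generate_passthrough_spec_spec : Claim_equal_generate_passthrough_spec := by
  intro n _; exact generate_passthrough_spec_eq n
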